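-- pv_equiv track=rewrite | github.com/roshaanmehar/Rubiks-Cube-Solver | 2drubikscube/cube-nets-app/backend/backend.py | check_piece_validity
-- ===== SOURCE A (Python) =====
-- opposites = {'w': 'y', 'y': 'w', 'r': 'o', 'o': 'r', 'g': 'b', 'b': 'g'}
--
-- def check_piece_validity(piece_str):
--     """Checks if an edge (2 chars) or corner (3 chars) string is valid."""
--     if len(set(piece_str)) != len(piece_str):
--         return False, f"repeated color in piece '{piece_str}'"
--     for c1 in piece_str:
--         for c2 in piece_str:
--             if c1 != c2 and opposites.get(c1) == c2:
--                 return False, f"opposite colors '{c1}'/'{c2}' in piece '{piece_str}'"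
--     return True, ""
-- ===== SOURCE B (Python) =====
-- opposites = {'w': 'y', 'y': 'w', 'r': 'o', 'o': 'r', 'g': 'b', 'b': 'g'}
--
-- AXES = (('w', 'y'), ('r', 'o'), ('g', 'b'))
--
-- def check_piece_validity(piece_str):
--     """Checks if an edge (2 chars) or corner (3 chars) string is valid."""
--     present = set(piece_str)
--     if len(piece_str) != len(present):
--         return False, f"repeated color in piece '{piece_str}'"
--     clash = {}
--     for a, b in AXES:
--         if a in present and b in present:
--             clash[a] = b
--             clash[b] = a
--     for c in piece_str:
--         if c in clash:
--             return False, f"opposite colors '{c}'/'{clash[c]}' in piece '{piece_str}'"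
--     return True, ""
-- ===== Notes on version B (the rewrite author's own statement) =====
-- stated objective: alternative
-- what changed: Instead of A's nested pairwise scan of the piece, B builds a presence set once, derives from the fixed table of three color axes a partner dict containing exactly the colors whose opposite is also present, and then finds the first character of the piece that is a key of that dict; the pairwise comparison loop disappears entirely.
import Mathlib
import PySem

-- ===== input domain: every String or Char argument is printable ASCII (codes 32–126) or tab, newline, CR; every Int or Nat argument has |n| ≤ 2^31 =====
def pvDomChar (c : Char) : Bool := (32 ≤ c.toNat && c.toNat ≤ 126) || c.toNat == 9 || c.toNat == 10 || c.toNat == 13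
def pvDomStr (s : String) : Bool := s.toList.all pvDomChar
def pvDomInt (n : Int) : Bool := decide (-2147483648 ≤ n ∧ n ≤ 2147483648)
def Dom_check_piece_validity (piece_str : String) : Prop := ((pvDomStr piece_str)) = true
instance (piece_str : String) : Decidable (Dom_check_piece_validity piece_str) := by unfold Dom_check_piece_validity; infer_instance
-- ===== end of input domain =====

-- B replaces A's nested pairwise loop by a partner dict derived from the fixed
-- table of three color axes, followed by a single find of the first clashing character.

-- ===== PORT A =====
def opposites : PySem.Dict Char Char :=
  PySem.Dict.ofList [('w','y'),('y','w'),('r','o'),('o','r'),('g','b'),('b','g')]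

def oppMsg (c1 c2 : Char) (s : String) : String :=
  "opposite colors '" ++ String.ofList [c1] ++ "'/'" ++ String.ofList [c2] ++ "' in piece '" ++ s ++ "'"

-- inner 'for c2 in piece_str' loop of A
def innerA (s : String) (c1 : Char) : List Char → Option (Bool × String)
  | [] => none
  | c2 :: rest =>
      if c1 ≠ c2 ∧ opposites.get? c1 = some c2 then some (false, oppMsg c1 c2 s)
      else innerA s c1 rest

-- outer 'for c1 in piece_str' loop of A
def outerA (s : String) : List Char → Option (Bool × String)
  | [] => none
  | c1 :: rest =>
      match innerA s c1 s.toList with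
      | some r => some r
      | none => outerA s rest

def check_piece_validity (piece_str : String) : Bool × String :=
  if (PySem.Set.ofList piece_str.toList).length ≠ piece_str.toList.length then
    (false, "repeated color in piece '" ++ piece_str ++ "'")
  else
    match outerA piece_str piece_str.toList with
    | some r => r
    | none => (true, "")

-- ===== PORT B =====
def AXES : List (Char × Char) := [('w','y'),('r','o'),('g','b')]

-- 'for a, b in AXES: if a in present and b in present: clash[a] = b; clash[b] = a'
def buildClash (present : PySem.Set Char) : PySem.Dict Char Char :=
  AXES.foldl
    (fun d ab =>
      if PySem.Set.contains present ab.1 && PySem.Set.contains present ab.2 then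
        (d.insert ab.1 ab.2).insert ab.2 ab.1
      else d)
    PySem.Dict.empty

-- 'for c in piece_str: if c in clash: return …'
def scanB (s : String) (clash : PySem.Dict Char Char) : List Char → Bool × String
  | [] => (true, "")
  | c :: rest =>
      match clash.get? c with
      | some p => (false, oppMsg c p s)
      | none => scanB s clash rest

def check_piece_validity_alt (piece_str : String) : Bool × String :=
  let present := PySem.Set.ofList piece_str.toList
  if piece_str.toList.length ≠ present.length then
    (false, "repeated color in piece '" ++ piece_str ++ "'")
  else
    scanB piece_str (buildClash present) piece_str.toList

-- ===== PRECONDITION & SPEC =====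
def Spec_check_piece_validity (piece_str : String) (out : Bool × String) : Prop := out = check_piece_validity_alt piece_str
instance (piece_str : String) (out : Bool × String) : Decidable (Spec_check_piece_validity piece_str out) := by unfold Spec_check_piece_validity; infer_instance

-- ===== CLAIM =====
def Claim_equal_check_piece_validity : Prop := ∀ (piece_str : String), Dom_check_piece_validity piece_str → Spec_check_piece_validity piece_str (check_piece_validity piece_str)

-- ===== LEMMAS AND PROOFS =====

-- opposites has no fixed point: a looked-up opposite differs from its key
lemma opp_ne (c o : Char) (h : opposites.get? c = some o) : o ≠ c := by
  have e : opposites = PySem.Dict.mk [('w','y'),('y','w'),('r','o'),('o','r'),('g','b'),('b','g')] := by decide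
  rw [e] at h
  simp only [PySem.Dict.get?_mk_cons] at h
  split_ifs at h <;> simp_all [PySem.Dict.get?] <;> subst_vars <;> decide

-- A's inner scan finds exactly the opposite of c1, if it occurs in the list
lemma innerA_eq (s : String) (c1 : Char) (l : List Char) :
    innerA s c1 l =
      match opposites.get? c1 with
      | some o => if o ∈ l then some (false, oppMsg c1 o s) else none
      | none => none := by
  induction l with
  | nil => cases h : opposites.get? c1 <;> simp [innerA]
  | cons c2 rest ih =>
    cases h : opposites.get? c1 with
    | none => simp only [innerA, h, ih]; simp
    | some o =>
      have hne := opp_ne c1 o h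
      by_cases hoc : o = c2
      · subst hoc
        simp [innerA, h, Ne.symm hne]
      · have : ¬ (c1 ≠ c2 ∧ opposites.get? c1 = some c2) := by
          rintro ⟨-, h2⟩; rw [h] at h2; exact hoc (Option.some.inj h2)
        simp only [innerA, ih, h]
        simp [hoc]

-- the clash dict keys are exactly the present colors whose opposite is present,
-- and the stored partner is that opposite
lemma clash_get (l : List Char) (c : Char) (hc : c ∈ l) :
    (buildClash (PySem.Set.ofList l)).get? c =
      match opposites.get? c with
      | some o => if o ∈ l then some o else none
      | none => none := by
  have hmem : ∀ x : Char, PySem.Set.contains (PySem.Set.ofList l) x = true ↔ x ∈ l := by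
    intro x; simp [PySem.Set.contains, PySem.Set.mem_ofList]
  by_cases e1 : c = 'w'
  · subst e1
    rw [show opposites.get? 'w' = some 'y' from by decide]
    simp only [buildClash, AXES, List.foldl]
    split_ifs with a1 a2 a3 <;>
      simp_all [PySem.Dict.get?_insert, PySem.Dict.get?_empty, Bool.and_eq_true]
  · by_cases e2 : c = 'y'
    · subst e2
      rw [show opposites.get? 'y' = some 'w' from by decide]
      simp only [buildClash, AXES, List.foldl]
      split_ifs with a1 a2 a3 <;>
        simp_all [PySem.Dict.get?_insert, PySem.Dict.get?_empty, Bool.and_eq_true]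
    · by_cases e3 : c = 'r'
      · subst e3
        rw [show opposites.get? 'r' = some 'o' from by decide]
        simp only [buildClash, AXES, List.foldl]
        split_ifs with a1 a2 a3 <;>
          simp_all [PySem.Dict.get?_insert, PySem.Dict.get?_empty, Bool.and_eq_true]
      · by_cases e4 : c = 'o'
        · subst e4
          rw [show opposites.get? 'o' = some 'r' from by decide]
          simp only [buildClash, AXES, List.foldl]
          split_ifs with a1 a2 a3 <;>
            simp_all [PySem.Dict.get?_insert, PySem.Dict.get?_empty, Bool.and_eq_true]
        · by_cases e5 : c = 'g'
          · subst e5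
            rw [show opposites.get? 'g' = some 'b' from by decide]
            simp only [buildClash, AXES, List.foldl]
            split_ifs with a1 a2 a3 <;>
              simp_all [PySem.Dict.get?_insert, PySem.Dict.get?_empty, Bool.and_eq_true]
          · by_cases e6 : c = 'b'
            · subst e6
              rw [show opposites.get? 'b' = some 'g' from by decide]
              simp only [buildClash, AXES, List.foldl]
              split_ifs with a1 a2 a3 <;>
                simp_all [PySem.Dict.get?_insert, PySem.Dict.get?_empty, Bool.and_eq_true]
            · have hnone : opposites.get? c = none := by
                have e : opposites = PySem.Dict.mk [('w','y'),('y','w'),('r','o'),('o','r'),('g','b'),('b','g')] := by decide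
                rw [e]
                simp only [PySem.Dict.get?_mk_cons]
                split_ifs <;> simp_all [PySem.Dict.get?, beq_iff_eq] <;> simp_all [eq_comm]
              rw [hnone]
              simp only [buildClash, AXES, List.foldl]
              split_ifs <;>
                simp [PySem.Dict.get?_insert, PySem.Dict.get?_empty, e1, e2, e3, e4, e5, e6]

-- A's outer loop agrees with B's scan over the clash dict
lemma outer_eq (s : String) (m : List Char) (hsub : ∀ c ∈ m, c ∈ s.toList) :
    (match outerA s m with | some r => r | none => (true, "")) =
    scanB s (buildClash (PySem.Set.ofList s.toList)) m := by
  induction m with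
  | nil => simp [outerA, scanB]
  | cons c rest ih =>
    have hc : c ∈ s.toList := hsub c (List.mem_cons_self ..)
    have hk := clash_get s.toList c hc
    rw [outerA, innerA_eq]
    cases h : opposites.get? c with
    | none =>
      rw [h] at hk
      simp only [scanB, hk]
      exact ih (fun x hx => hsub x (List.mem_cons_of_mem _ hx))
    | some o =>
      rw [h] at hk
      by_cases hm : o ∈ s.toList
      · simp only [hm, if_true] at hk
        simp [scanB, hk, hm]
      · simp only [hm, if_false] at hk
        simp only [scanB, hk, hm, if_false]
        exact ih (fun x hx => hsub x (List.mem_cons_of_mem _ hx))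

-- ===== VERDICT =====
theorem check_piece_validity_spec : Claim_equal_check_piece_validity := by
  intro s _
  unfold Spec_check_piece_validity check_piece_validity check_piece_validity_alt
  simp only [ne_eq]
  by_cases h : (PySem.Set.ofList s.toList).length = s.toList.length
  · rw [if_neg (by omega), if_neg (by omega)]
    exact outer_eq s s.toList (fun _ hx => hx)
  · rw [if_pos (by omega), if_pos (by omega)]
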